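-- pv_equiv track=rewrite | github.com/amertzani/DE | helpers.py | distance3
-- ===== SOURCE A (Python) =====
-- def distance3(dict1,dict2):
--   distance = 0
--   for key, pos1 in dict1.items():
--     pos2 = dict2.get(key)
--     if (pos2 is not None):
--       if ((pos1 == 0 and pos2 !=0) or (pos1 != 0 and pos2 ==0)):
--         distance +=1
--   return distance
-- ===== SOURCE B (Python) =====
-- def distance3(dict1, dict2):
--     zeros1 = {k for k, v in dict1.items() if v == 0}
--     zeros2 = {k for k, v in dict2.items() if v == 0}
--     common = dict1.keys() & dict2.keys()
--     return len((zeros1 ^ zeros2) & common)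
-- ===== Notes on version B (the rewrite author's own statement) =====
-- stated objective: alternative
-- what changed: Replaces the per-key XOR counting loop with set algebra: build the zero-valued key sets of both dicts and return the size of their symmetric difference intersected with the common keys.
import Mathlib
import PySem

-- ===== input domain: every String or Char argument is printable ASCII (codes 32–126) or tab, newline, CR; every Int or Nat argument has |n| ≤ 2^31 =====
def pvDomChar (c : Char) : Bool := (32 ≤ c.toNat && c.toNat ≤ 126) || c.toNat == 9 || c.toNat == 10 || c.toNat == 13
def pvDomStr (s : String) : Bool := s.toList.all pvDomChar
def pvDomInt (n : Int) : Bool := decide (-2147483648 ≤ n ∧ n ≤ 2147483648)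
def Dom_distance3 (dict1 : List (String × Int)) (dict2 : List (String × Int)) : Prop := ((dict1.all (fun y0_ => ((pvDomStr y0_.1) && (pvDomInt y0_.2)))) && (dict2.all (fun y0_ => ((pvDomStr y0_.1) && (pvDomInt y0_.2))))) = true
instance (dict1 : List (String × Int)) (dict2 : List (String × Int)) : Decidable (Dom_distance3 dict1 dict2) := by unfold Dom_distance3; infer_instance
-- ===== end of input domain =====

-- B replaces A's per-key XOR counting loop by set algebra (zero-key sets, symmetric difference ∩ common keys); alternative decomposition, same cost.


-- ===== PORT A =====
def distance3 (dict1 : List (String × Int)) (dict2 : List (String × Int)) : Int :=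
  let d1 := PySem.Dict.ofList dict1
  let d2 := PySem.Dict.ofList dict2
  d1.items.foldl (fun (distance : Int) (kv : String × Int) =>
    match d2.get? kv.1 with
    | none => distance
    | some pos2 =>
      if (kv.2 == 0 && pos2 != 0) || (kv.2 != 0 && pos2 == 0) then distance + 1
      else distance) 0

-- ===== PORT B =====
def distance3_alt (dict1 : List (String × Int)) (dict2 : List (String × Int)) : Int :=
  let d1 := PySem.Dict.ofList dict1
  let d2 := PySem.Dict.ofList dict2
  let zeros1 : PySem.Set String := PySem.Set.ofList ((d1.items.filter (fun kv => kv.2 == 0)).map Prod.fst)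
  let zeros2 : PySem.Set String := PySem.Set.ofList ((d2.items.filter (fun kv => kv.2 == 0)).map Prod.fst)
  let common : PySem.Set String := PySem.Set.inter (PySem.Set.ofList d1.keys) (PySem.Set.ofList d2.keys)
  PySem.Set.len (PySem.Set.inter (PySem.Set.symmDiff zeros1 zeros2) common)

-- ===== PRECONDITION & SPEC =====
def Spec_distance3 (dict1 : List (String × Int)) (dict2 : List (String × Int)) (out : Int) : Prop := out = distance3_alt dict1 dict2
instance (dict1 : List (String × Int)) (dict2 : List (String × Int)) (out : Int) : Decidable (Spec_distance3 dict1 dict2 out) := by unfold Spec_distance3; infer_instance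

-- ===== CLAIM (what is proved, stated in full; the proofs are below) =====
def Claim_equal_distance3 : Prop := ∀ (dict1 : List (String × Int)) (dict2 : List (String × Int)), Dom_distance3 dict1 dict2 → Spec_distance3 dict1 dict2 (distance3 dict1 dict2)

-- ===== LEMMAS AND PROOFS =====

theorem mem_zeroKeys (d : PySem.Dict String Int) (hn : d.keys.Nodup) (k : String) :
    k ∈ (d.items.filter (fun kv => kv.2 == 0)).map Prod.fst ↔ d.get? k = some 0 := by
  rw [PySem.Dict.get?_eq_some_iff_mem_items d k 0 hn]
  constructor
  · rintro h
    simp only [List.mem_map, List.mem_filter] at h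
    obtain ⟨⟨k', v⟩, ⟨hmem, hv⟩, rfl⟩ := h
    simp only [beq_iff_eq] at hv
    subst hv; exact hmem
  · intro h
    simp only [List.mem_map, List.mem_filter]
    exact ⟨(k, 0), ⟨h, by simp⟩, rfl⟩

theorem nodup_zeroKeys (d : PySem.Dict String Int) (hn : d.keys.Nodup) :
    ((d.items.filter (fun kv => kv.2 == 0)).map Prod.fst).Nodup := by
  have hsub : ((d.items.filter (fun kv => kv.2 == 0)).map Prod.fst).Sublist (d.items.map Prod.fst) :=
    List.Sublist.map Prod.fst List.filter_sublist
  exact hn.sublist hsub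

theorem countP_split {α : Type} (p q : α → Bool) (l : List α) :
    l.countP p = l.countP (fun a => p a && q a) + l.countP (fun a => p a && !q a) := by
  induction l with
  | nil => simp
  | cons x xs ih =>
    by_cases hx : p x = true <;> by_cases hq : q x = true <;>
      simp [hx, hq, ih] <;> omega

-- mem l2 → mem keys2
theorem mem_keys_of_mem_zeroKeys (d : PySem.Dict String Int) (hn : d.keys.Nodup) (k : String)
    (h : k ∈ (d.items.filter (fun kv => kv.2 == 0)).map Prod.fst) : k ∈ d.keys := by
  rw [mem_zeroKeys d hn] at h
  by_contra hc
  rw [← PySem.Dict.get?_eq_none_iff_not_mem_keys] at hc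
  simp [hc] at h

theorem distance3_spec_aux (dict1 dict2 : List (String × Int)) :
    (PySem.Dict.ofList dict1).items.foldl (fun distance kv =>
      match (PySem.Dict.ofList dict2).get? kv.1 with
      | none => distance
      | some pos2 =>
        if (kv.2 == 0 && pos2 != 0) || (kv.2 != 0 && pos2 == 0) then distance + 1
        else distance) 0
    =
    PySem.Set.len (PySem.Set.inter
      (PySem.Set.symmDiff
        (PySem.Set.ofList (((PySem.Dict.ofList dict1).items.filter (fun kv => kv.2 == 0)).map Prod.fst))
        (PySem.Set.ofList (((PySem.Dict.ofList dict2).items.filter (fun kv => kv.2 == 0)).map Prod.fst)))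
      (PySem.Set.inter (PySem.Set.ofList (PySem.Dict.ofList dict1).keys)
        (PySem.Set.ofList (PySem.Dict.ofList dict2).keys))) := by
  set d1 := PySem.Dict.ofList dict1 with hd1
  set d2 := PySem.Dict.ofList dict2 with hd2
  have hn1 : d1.keys.Nodup := PySem.Dict.nodup_keys_ofList dict1
  have hn2 : d2.keys.Nodup := PySem.Dict.nodup_keys_ofList dict2
  set l1 := (d1.items.filter (fun kv => kv.2 == 0)).map Prod.fst with hl1
  set l2 := (d2.items.filter (fun kv => kv.2 == 0)).map Prod.fst with hl2
  have hnl1 := nodup_zeroKeys d1 hn1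
  have hnl2 := nodup_zeroKeys d2 hn2
  rw [PySem.Set.ofList_eq_self_of_nodup l1 hnl1, PySem.Set.ofList_eq_self_of_nodup l2 hnl2,
      PySem.Set.ofList_eq_self_of_nodup _ hn1, PySem.Set.ofList_eq_self_of_nodup _ hn2]
  -- A side: fold = countP
  set pA : String × Int → Bool := fun kv =>
    match d2.get? kv.1 with
    | none => false
    | some pos2 => (kv.2 == 0 && pos2 != 0) || (kv.2 != 0 && pos2 == 0) with hpA
  have hfold : d1.items.foldl (fun (distance : Int) (kv : String × Int) =>
      match d2.get? kv.1 with
      | none => distance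
      | some pos2 =>
        if (kv.2 == 0 && pos2 != 0) || (kv.2 != 0 && pos2 == 0) then distance + 1
        else distance) (0 : Int)
      = d1.items.foldl (fun (acc : Int) (kv : String × Int) => if pA kv then acc + 1 else acc) 0 := by
    congr 1
    funext acc kv
    rw [hpA]
    cases h : d2.get? kv.1 <;> simp [h]
  refine hfold.trans ?_
  rw [PySem.List.foldl_count_if, zero_add]
  -- B side: unfold the set operations into filters
  simp only [PySem.Set.len, PySem.Set.inter, PySem.Set.symmDiff, PySem.Set.diff,
    List.filter_append, List.length_append]
  set common := List.filter (fun x => PySem.Set.contains d2.keys x) d1.keys with hcommon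
  -- characterise pA
  have hchar : ∀ kv : String × Int, pA kv =
      (((kv.2 == 0) && (decide (kv.1 ∈ d2.keys) && !decide (kv.1 ∈ l2)))
      || (!(kv.2 == 0) && decide (kv.1 ∈ l2))) := by
    intro kv
    rw [hpA]
    cases h : d2.get? kv.1 with
    | none =>
      have hk : kv.1 ∉ d2.keys := (PySem.Dict.get?_eq_none_iff_not_mem_keys d2 kv.1).mp h
      have hz : kv.1 ∉ l2 := fun hm => hk (mem_keys_of_mem_zeroKeys d2 hn2 kv.1 hm)
      simp [h, hk, hz]
    | some v =>
      have hk : kv.1 ∈ d2.keys := by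
        by_contra hc
        rw [← PySem.Dict.get?_eq_none_iff_not_mem_keys] at hc
        simp [hc] at h
      have hz : kv.1 ∈ l2 ↔ v = 0 := by
        rw [hl2, mem_zeroKeys d2 hn2, h]
        simp
      by_cases hv : v = 0 <;> by_cases hkv : kv.2 = 0 <;>
        simp [h, hk, hz, hv, hkv, Bool.beq_eq_decide_eq]
  -- split the count
  have hPfun : pA = fun kv : String × Int =>
      (((kv.2 == 0) && (decide (kv.1 ∈ d2.keys) && !decide (kv.1 ∈ l2)))
      || (!(kv.2 == 0) && decide (kv.1 ∈ l2))) := funext hchar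
  rw [hPfun]
  rw [countP_split _ (fun kv : String × Int => kv.2 == 0) d1.items]
  -- term 1
  have hterm1 : (List.countP (fun kv : String × Int =>
        (((kv.2 == 0) && (decide (kv.1 ∈ d2.keys) && !decide (kv.1 ∈ l2)))
          || (!(kv.2 == 0) && decide (kv.1 ∈ l2))) && (kv.2 == 0)) d1.items)
      = (List.filter (fun x => PySem.Set.contains common x)
          (List.filter (fun x => !PySem.Set.contains l2 x) l1)).length := by
    rw [List.filter_filter, ← List.countP_eq_length_filter, hl1, List.countP_map,
        List.countP_filter]
    apply List.countP_congr
    intro kv hkv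
    have hk1 : kv.1 ∈ d1.keys := PySem.Dict.mem_keys_of_mem_items d1 hkv
    simp only [PySem.Set.contains, hcommon]
    by_cases h0 : kv.2 = 0 <;> by_cases hm2 : kv.1 ∈ l2 <;>
      by_cases hk2 : kv.1 ∈ d2.keys <;>
      simp [h0, hm2, hk2, hk1]
  rw [hterm1]
  have hterm2 : List.countP (fun a : String × Int =>
        (((a.2 == 0) && (decide (a.1 ∈ d2.keys) && !decide (a.1 ∈ l2)))
          || (!(a.2 == 0) && decide (a.1 ∈ l2))) && !(a.2 == 0)) d1.items
      = (List.filter (fun x => PySem.Set.contains common x)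
          (List.filter (fun x => !PySem.Set.contains l1 x) l2)).length := by
    have hq : List.countP (fun a : String × Int =>
          (((a.2 == 0) && (decide (a.1 ∈ d2.keys) && !decide (a.1 ∈ l2)))
            || (!(a.2 == 0) && decide (a.1 ∈ l2))) && !(a.2 == 0)) d1.items
        = List.countP (fun a : String × Int => !(a.2 == 0) && decide (a.1 ∈ l2)) d1.items := by
      apply List.countP_congr
      intro a _
      by_cases h0 : a.2 = 0 <;> simp [h0]
    rw [hq, List.countP_eq_length_filter]
    set r : String × Int → Bool := fun a => !(a.2 == 0) && decide (a.1 ∈ l2) with hr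
    have hLnodup : ((d1.items.filter r).map Prod.fst).Nodup :=
      hn1.sublist (List.Sublist.map Prod.fst List.filter_sublist)
    have hRnodup2 : ((l2.filter (fun a => PySem.Set.contains common a && !PySem.Set.contains l1 a)).Nodup) :=
      hnl2.filter _
    rw [show (d1.items.filter r).length = ((d1.items.filter r).map Prod.fst).length from (List.length_map ..).symm]
    rw [List.filter_filter]
    rw [← List.toFinset_card_of_nodup hLnodup, ← List.toFinset_card_of_nodup hRnodup2]
    congr 1
    have hP : ∀ k : String, (k ∈ (d1.items.filter r).map Prod.fst) ↔
        ((∃ v, d1.get? k = some v ∧ v ≠ 0) ∧ d2.get? k = some 0) := by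
      intro k
      simp only [List.mem_map, List.mem_filter, hr, Bool.and_eq_true, Bool.not_eq_eq_eq_not,
        Bool.not_true, beq_eq_false_iff_ne, ne_eq, decide_eq_true_eq]
      constructor
      · rintro ⟨⟨k', v⟩, ⟨hmem, hv, hml2⟩, rfl⟩
        exact ⟨⟨v, (PySem.Dict.get?_eq_some_iff_mem_items d1 k' v hn1).mpr hmem, hv⟩,
          (mem_zeroKeys d2 hn2 k').mp hml2⟩
      · rintro ⟨⟨v, hget, hv⟩, hz⟩
        exact ⟨(k, v), ⟨(PySem.Dict.get?_eq_some_iff_mem_items d1 k v hn1).mp hget, hv,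
          (mem_zeroKeys d2 hn2 k).mpr hz⟩, rfl⟩
    have hkeys : ∀ (d : PySem.Dict String Int) (k : String) (v : Int),
        d.get? k = some v → k ∈ d.keys := by
      intro d k v hget
      by_contra hc
      rw [← PySem.Dict.get?_eq_none_iff_not_mem_keys] at hc
      rw [hget] at hc
      simp at hc
    have hQ : ∀ k : String,
        (k ∈ l2.filter (fun a => PySem.Set.contains common a && !PySem.Set.contains l1 a)) ↔
        ((∃ v, d1.get? k = some v ∧ v ≠ 0) ∧ d2.get? k = some 0) := by
      intro k
      simp only [List.mem_filter, PySem.Set.contains, hcommon, Bool.and_eq_true,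
        Bool.not_eq_true', List.contains_eq_mem, decide_eq_false_iff_not, decide_eq_true_eq]
      constructor
      · rintro ⟨hml2, ⟨hk1, _hk2⟩, hnl1m⟩
        have hne : d1.get? k ≠ none := by
          intro hc
          exact ((PySem.Dict.get?_eq_none_iff_not_mem_keys d1 k).mp hc) hk1
        obtain ⟨v, hget⟩ := Option.ne_none_iff_exists'.mp hne
        have hv : v ≠ 0 := by
          intro h0
          apply hnl1m
          rw [hl1, mem_zeroKeys d1 hn1, ← h0]
          exact hget
        exact ⟨⟨v, hget, hv⟩, (mem_zeroKeys d2 hn2 k).mp hml2⟩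
      · rintro ⟨⟨v, hget, hv⟩, hz⟩
        refine ⟨(mem_zeroKeys d2 hn2 k).mpr hz, ⟨⟨hkeys d1 k v hget, hkeys d2 k 0 hz⟩, ?_⟩⟩
        intro ha
        rw [hl1, mem_zeroKeys d1 hn1, hget] at ha
        exact hv (Option.some_inj.mp ha)
    ext k
    simp only [List.mem_toFinset]
    rw [hP k, hQ k]
  rw [hterm2]


theorem distance3_eq_alt (dict1 dict2 : List (String × Int)) :
    distance3 dict1 dict2 = distance3_alt dict1 dict2 :=
  distance3_spec_aux dict1 dict2

-- ===== VERDICT (by name: the statement is the Claim_ definition above) =====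
theorem distance3_spec : Claim_equal_distance3 := by
  intro dict1 dict2 _
  unfold Spec_distance3
  exact distance3_eq_alt dict1 dict2
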